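-- pv_equiv track=rewrite | github.com/Jungsu-lilly/coding_test_study | 프로그래머스/lv2/이재관/codingTestStudy_0814.py | solution
-- ===== SOURCE A (Python) =====
-- def solution(s, skip, index):
--     answer =''
--     ord_skip = [ord(char) for char in skip]
--
--     answer = ''
--     for i in s:
--         tmp_s = ord(i)
--         cnt = 0
--
--         while cnt < index:
--             tmp_s += 1
--             if tmp_s > ord('z'):
--                 tmp_s = ord('a')
--             if tmp_s not in ord_skip:
--                 cnt += 1
--
--         answer += chr(tmp_s)
--     return answer
-- ===== SOURCE B (Python) =====
-- def solution(s, skip, index):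
--     banned = {ord(c) for c in skip}
--     allowed = [c for c in range(97, 123) if c not in banned]
--     out = []
--     for ch in s:
--         t = ord(ch)
--         if index > 0:
--             pref = [c for c in range(t + 1, 123) if c not in banned]
--             if index <= len(pref):
--                 t = pref[index - 1]
--             else:
--                 t = allowed[(index - len(pref) - 1) % len(allowed)]
--         out.append(chr(t))
--     return ''.join(out)
-- ===== Notes on version B (the rewrite author's own statement) =====
-- stated objective: faster
-- what changed: Replaces A's per-character step-by-step simulation (a while loop advancing one codepoint at a time, counting non-skip hits index times) with a closed-form computation: count the non-skipped codepoints up to 'z' once, then index the ordered allowed-letter list with one modular arithmetic expression per character.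
import Mathlib
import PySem

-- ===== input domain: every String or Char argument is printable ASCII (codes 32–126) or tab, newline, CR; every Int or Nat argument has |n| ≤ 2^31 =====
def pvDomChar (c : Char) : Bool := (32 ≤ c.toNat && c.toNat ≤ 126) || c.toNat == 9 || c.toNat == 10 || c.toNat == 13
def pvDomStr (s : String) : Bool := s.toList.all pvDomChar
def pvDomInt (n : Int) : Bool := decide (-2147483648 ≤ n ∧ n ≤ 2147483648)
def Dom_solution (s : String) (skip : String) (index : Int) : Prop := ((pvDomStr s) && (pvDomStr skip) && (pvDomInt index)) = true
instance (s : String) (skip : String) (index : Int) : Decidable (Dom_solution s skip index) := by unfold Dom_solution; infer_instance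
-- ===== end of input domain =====

-- B replaces A's one-codepoint-at-a-time while loop by one closed-form modular index computation
-- per character (faster when index is large); return values agree on all of Pre_solution.

-- ===== PORT A =====
-- A's while loop, transliterated with a fuel guard that only makes it total: the body runs
-- exactly while cnt < index, and the fuel 27*index.toNat+130 is never exhausted on Pre_ inputs.
def solnLoop (ord_skip : List Int) (index : Int) : Nat → Int → Int → Int
  | 0, tmp, _ => tmp
  | fuel + 1, tmp, cnt =>
    if cnt < index then
      let t1 := tmp + 1
      let t2 := if t1 > 122 then 97 else t1
      if ord_skip.contains t2 then solnLoop ord_skip index fuel t2 cnt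
      else solnLoop ord_skip index fuel t2 (cnt + 1)
    else tmp

def solution (s : String) (skip : String) (index : Int) : String :=
  let ord_skip := skip.toList.map (fun c => (c.toNat : Int))
  let answer := s.toList.foldl
    (fun acc (i : Char) =>
      acc ++ [Char.ofNat (solnLoop ord_skip index (27 * index.toNat + 130) ((i.toNat : Int)) 0).toNat])
    ([] : List Char)
  String.mk answer

-- ===== PORT B =====
-- pref[index-1] / allowed[...] are in range on every Pre_ input; the .getD 0 only totalises pyGet?.
def solution_alt (s : String) (skip : String) (index : Int) : String :=
  let banned := PySem.Set.ofList (skip.toList.map (fun c => (c.toNat : Int)))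
  let allowed := (PySem.List.pyRange 97 123 1).filter (fun c => !(banned.contains c))
  let out := s.toList.map (fun ch =>
    let t : Int := (ch.toNat : Int)
    let t' := if index > 0 then
        let pref := (PySem.List.pyRange (t + 1) 123 1).filter (fun c => !(banned.contains c))
        if index ≤ (pref.length : Int) then (PySem.List.pyGet? pref (index - 1)).getD 0
        else (PySem.List.pyGet? allowed
               (PySem.Int.mod (index - (pref.length : Int) - 1) ((allowed.length : Int)))).getD 0
      else t
    Char.ofNat t'.toNat)
  String.mk out

-- ===== PRECONDITION & SPEC =====
-- Pre_ excludes exactly the inputs on which A's while loop never terminates (Python A diverges):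
-- index > 0 while every lowercase letter is in skip and some character of s has fewer than index
-- non-skipped codepoints before 'z'.  A returns on every input satisfying Pre_.
def Pre_solution (s : String) (skip : String) (index : Int) : Prop :=
  index ≤ 0
  ∨ ((PySem.List.pyRange 97 123 1).filter
       (fun c => !((skip.toList.map (fun ch => (ch.toNat : Int))).contains c))) ≠ []
  ∨ ∀ ch ∈ s.toList, index ≤
      ((((PySem.List.pyRange ((ch.toNat : Int) + 1) 123 1).filter
          (fun c => !((skip.toList.map (fun ch2 => (ch2.toNat : Int))).contains c))).length : Int))
instance (s : String) (skip : String) (index : Int) : Decidable (Pre_solution s skip index) := by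
  unfold Pre_solution; infer_instance

def pvWitness_solution : String × String × Int := ("hello", "xz", 5)

def Spec_solution (s : String) (skip : String) (index : Int) (out : String) : Prop := out = solution_alt s skip index
instance (s : String) (skip : String) (index : Int) (out : String) : Decidable (Spec_solution s skip index out) := by unfold Spec_solution; infer_instance

-- ===== CLAIM (what is proved, stated in full; the proofs are below) =====
def Claim_equal_solution : Prop := ∀ (s : String) (skip : String) (index : Int), Dom_solution s skip index → Pre_solution s skip index → Spec_solution s skip index (solution s skip index)

-- ===== LEMMAS AND PROOFS =====

-- Proof-side view of A's loop: state (tmp, r) with r = index - cnt remaining counts.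
def pvLoopR (b : List Int) : Nat → Int → Int → Int
  | 0, tmp, _ => tmp
  | fuel + 1, tmp, r =>
    if 0 < r then
      let t2 := if tmp + 1 > 122 then 97 else tmp + 1
      if b.contains t2 then pvLoopR b fuel t2 r
      else pvLoopR b fuel t2 (r - 1)
    else tmp

-- the non-banned codepoints strictly between t and 123
def pvNB (b : List Int) (t : Int) : List Int :=
  (PySem.List.pyRange (t + 1) 123 1).filter (fun c => !(b.contains c))

def pvAllowed (b : List Int) : List Int :=
  (PySem.List.pyRange 97 123 1).filter (fun c => !(b.contains c))

theorem pvLoopR_bridge (b : List Int) (index : Int) :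
    ∀ (fuel : Nat) (tmp cnt : Int),
      solnLoop b index fuel tmp cnt = pvLoopR b fuel tmp (index - cnt) := by
  intro fuel
  induction fuel with
  | zero => intro tmp cnt; rfl
  | succ f ih =>
    intro tmp cnt
    simp only [solnLoop, pvLoopR]
    by_cases h : cnt < index
    · simp only [if_pos h, if_pos (by omega : 0 < index - cnt)]
      by_cases hc : b.contains (if tmp + 1 > 122 then 97 else tmp + 1)
      · simp only [if_pos hc, ih]
      · simp only [if_neg hc, ih]
        congr 1
        omega
    · simp only [if_neg h, if_neg (by omega : ¬ 0 < index - cnt)]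

theorem pvLoopR_done (b : List Int) :
    ∀ (fuel : Nat) (tmp r : Int), r ≤ 0 → pvLoopR b fuel tmp r = tmp := by
  intro fuel tmp r hr
  cases fuel with
  | zero => rfl
  | succ f => simp only [pvLoopR, if_neg (by omega : ¬ 0 < r)]

theorem pvWalk (b : List Int) :
    ∀ (k fuel : Nat) (tmp r : Int), tmp = 122 - (k : Int) → 0 < r → k ≤ fuel →
      (r ≤ ((pvNB b tmp).length : Int) →
        pvLoopR b fuel tmp r = (pvNB b tmp).getD (r - 1).toNat 0)
      ∧ (((pvNB b tmp).length : Int) < r →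
        pvLoopR b fuel tmp r = pvLoopR b (fuel - k) 122 (r - ((pvNB b tmp).length : Int))) := by
  intro k
  induction k with
  | zero =>
    intro fuel tmp r htmp hr hk
    have hnb : pvNB b tmp = [] := by
      unfold pvNB
      rw [PySem.List.pyRange_one_eq_nil (by omega)]
      rfl
    refine ⟨fun hlen => ?_, fun _ => ?_⟩
    · rw [hnb] at hlen; simp at hlen; omega
    · rw [hnb]; subst htmp; norm_num
  | succ k ih =>
    intro fuel tmp r htmp hr hk
    obtain ⟨f, rfl⟩ : ∃ f, fuel = f + 1 := ⟨fuel - 1, by omega⟩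
    have hf : k ≤ f := by omega
    have hklt : tmp = 122 - ((k : Int) + 1) := by push_cast at htmp ⊢; omega
    have ht2 : ¬ tmp + 1 > 122 := by omega
    have htmp' : tmp + 1 = 122 - (k : Int) := by omega
    by_cases hc : b.contains (tmp + 1)
    · have hnb : pvNB b tmp = pvNB b (tmp + 1) := by
        unfold pvNB
        rw [PySem.List.pyRange_one_cons (by omega), List.filter_cons, if_neg (by rw [hc]; simp)]
      obtain ⟨ihA, ihB⟩ := ih f (tmp + 1) r htmp' hr hf
      refine ⟨fun hlen => ?_, fun hlen => ?_⟩
      · rw [hnb] at hlen ⊢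
        simp only [pvLoopR, if_pos hr, if_neg ht2, if_pos hc]
        exact ihA hlen
      · rw [hnb] at hlen ⊢
        simp only [pvLoopR, if_pos hr, if_neg ht2, if_pos hc]
        rw [show f + 1 - (k + 1) = f - k from by omega]
        exact ihB hlen
    · have hnb : pvNB b tmp = (tmp + 1) :: pvNB b (tmp + 1) := by
        unfold pvNB
        rw [PySem.List.pyRange_one_cons (by omega), List.filter_cons,
            if_pos (by rw [Bool.not_eq_true] at hc; rw [hc]; rfl)]
      refine ⟨fun hlen => ?_, fun hlen => ?_⟩
      · simp only [pvLoopR, if_pos hr, if_neg ht2, if_neg hc]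
        by_cases hr1 : r = 1
        · subst hr1
          rw [pvLoopR_done b f (tmp + 1) (1 - 1) (by norm_num), hnb]
          norm_num
        · have hr2 : 0 < r - 1 := by omega
          obtain ⟨ihA, _⟩ := ih f (tmp + 1) (r - 1) htmp' hr2 hf
          rw [hnb] at hlen
          have hlen' : r - 1 ≤ ((pvNB b (tmp + 1)).length : Int) := by
            simp only [List.length_cons] at hlen; push_cast at hlen; omega
          rw [ihA hlen', hnb]
          rw [show (r - 1).toNat = (r - 1 - 1).toNat + 1 from by omega]
          simp
      · simp only [pvLoopR, if_pos hr, if_neg ht2, if_neg hc]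
        rw [hnb] at hlen
        have hlen' : ((pvNB b (tmp + 1)).length : Int) < r - 1 := by
          simp only [List.length_cons] at hlen; push_cast at hlen; omega
        obtain ⟨_, ihB⟩ := ih f (tmp + 1) (r - 1) htmp' (by omega) hf
        rw [ihB hlen', hnb]
        rw [show f + 1 - (k + 1) = f - k from by omega]
        congr 1
        simp only [List.length_cons]
        push_cast
        ring

theorem pvSwitch (b : List Int) (fuel : Nat) (tmp r : Int)
    (h : 122 ≤ tmp) (hr : 0 < r) (hf : 1 ≤ fuel) :
    pvLoopR b fuel tmp r = pvLoopR b fuel 96 r := by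
  cases fuel with
  | zero => omega
  | succ f =>
    simp only [pvLoopR, if_pos hr]
    rw [if_pos (by omega : tmp + 1 > 122), if_neg (by norm_num : ¬ (96 : Int) + 1 > 122)]
    norm_num

theorem pvCycle (b : List Int) (hm : pvAllowed b ≠ []) :
    ∀ (n fuel : Nat) (r : Int), 0 < r → r ≤ (n : Int) → 27 * n ≤ fuel →
      pvLoopR b fuel 122 r
        = (pvAllowed b).getD (PySem.Int.mod (r - 1) ((pvAllowed b).length : Int)).toNat 0 := by
  have hm1 : 1 ≤ (pvAllowed b).length := List.length_pos_of_ne_nil hm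
  have hmpos : (0 : Int) < ((pvAllowed b).length : Int) := by exact_mod_cast hm1
  intro n
  induction n with
  | zero => intro fuel r hr hrn _; exfalso; push_cast at hrn; omega
  | succ n ih =>
    intro fuel r hr hrn hfuel
    rw [pvSwitch b fuel 122 r le_rfl hr (by omega)]
    have hnb96 : pvNB b 96 = pvAllowed b := by unfold pvNB pvAllowed; norm_num
    obtain ⟨wA, wB⟩ := pvWalk b 26 fuel 96 r (by norm_num) hr (by omega)
    rw [hnb96] at wA wB
    by_cases hcase : r ≤ ((pvAllowed b).length : Int)
    · rw [wA hcase]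
      congr 2
      rw [PySem.Int.mod_eq_emod_of_pos hmpos, Int.emod_eq_of_lt (by omega) (by omega)]
    · replace hcase : ((pvAllowed b).length : Int) < r := by omega
      rw [wB hcase]
      rw [ih (fuel - 26) (r - ((pvAllowed b).length : Int)) (by omega)
          (by push_cast at hrn ⊢; omega) (by omega)]
      have hmod : PySem.Int.mod (r - ((pvAllowed b).length : Int) - 1) ((pvAllowed b).length : Int)
          = PySem.Int.mod (r - 1) ((pvAllowed b).length : Int) := by
        rw [PySem.Int.mod_eq_emod_of_pos hmpos, PySem.Int.mod_eq_emod_of_pos hmpos,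
            show r - ((pvAllowed b).length : Int) - 1 = (r - 1) - ((pvAllowed b).length : Int) from
              by ring,
            Int.sub_emod_right]
      rw [hmod]

theorem pvNB96 (b : List Int) : pvNB b 96 = pvAllowed b := by
  unfold pvNB pvAllowed; norm_num

theorem pvGetD_bridge (l : List Int) (i : Int) (h : 0 ≤ i) :
    (PySem.List.pyGet? l i).getD 0 = l.getD i.toNat 0 := by
  rw [PySem.List.pyGet?_of_nonneg l h]
  simp [List.getD]

theorem pvChar (b : List Int) (index t : Int) (ht0 : 0 ≤ t) (hi : 0 < index)
    (hp : pvAllowed b ≠ [] ∨ index ≤ ((pvNB b t).length : Int)) :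
    solnLoop b index (27 * index.toNat + 130) t 0
      = (if index ≤ ((pvNB b t).length : Int)
          then (PySem.List.pyGet? (pvNB b t) (index - 1)).getD 0
          else (PySem.List.pyGet? (pvAllowed b)
                (PySem.Int.mod (index - ((pvNB b t).length : Int) - 1)
                  ((pvAllowed b).length : Int))).getD 0) := by
  rw [pvLoopR_bridge b index _ t 0, show index - 0 = index from by ring]
  by_cases ht : t ≤ 122
  · have htk : t = 122 - (((122 - t).toNat : Nat) : Int) := by omega
    have hk : (122 - t).toNat ≤ 27 * index.toNat + 130 := by omega
    obtain ⟨wA, wB⟩ := pvWalk b (122 - t).toNat (27 * index.toNat + 130) t index htk hi hk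
    by_cases hlen : index ≤ ((pvNB b t).length : Int)
    · rw [if_pos hlen, wA hlen, pvGetD_bridge _ _ (by omega)]
    · rw [if_neg hlen]
      replace hlen : ((pvNB b t).length : Int) < index := by omega
      have hm : pvAllowed b ≠ [] := by
        rcases hp with h | h
        · exact h
        · omega
      have hmpos : (0 : Int) < ((pvAllowed b).length : Int) := by
        exact_mod_cast List.length_pos_of_ne_nil hm
      rw [wB hlen]
      rw [pvCycle b hm (index - ((pvNB b t).length : Int)).toNat
            (27 * index.toNat + 130 - (122 - t).toNat) (index - ((pvNB b t).length : Int))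
            (by omega) (by omega) (by omega)]
      rw [pvGetD_bridge _ _ (PySem.Int.mod_nonneg _ hmpos)]
  · have hnb : pvNB b t = [] := by
      unfold pvNB
      rw [PySem.List.pyRange_one_eq_nil (by omega)]
      rfl
    have hm : pvAllowed b ≠ [] := by
      rcases hp with h | h
      · exact h
      · rw [hnb] at h; simp at h; omega
    have hmpos : (0 : Int) < ((pvAllowed b).length : Int) := by
      exact_mod_cast List.length_pos_of_ne_nil hm
    rw [pvSwitch b _ t index (by omega) hi (by omega)]
    obtain ⟨wA, wB⟩ := pvWalk b 26 (27 * index.toNat + 130) 96 index (by norm_num) hi (by omega)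
    rw [pvNB96] at wA wB
    rw [hnb]
    rw [if_neg (by simp; omega)]
    simp only [List.length_nil, Nat.cast_zero, sub_zero]
    by_cases hc : index ≤ ((pvAllowed b).length : Int)
    · rw [wA hc, pvGetD_bridge _ _ (PySem.Int.mod_nonneg _ hmpos)]
      congr 2
      rw [PySem.Int.mod_eq_emod_of_pos hmpos, Int.emod_eq_of_lt (by omega) (by omega)]
    · replace hc : ((pvAllowed b).length : Int) < index := by omega
      rw [wB hc]
      rw [pvCycle b hm (index - ((pvAllowed b).length : Int)).toNat
            (27 * index.toNat + 130 - 26) (index - ((pvAllowed b).length : Int))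
            (by omega) (by omega) (by omega)]
      rw [pvGetD_bridge _ _ (PySem.Int.mod_nonneg _ hmpos)]
      congr 2
      rw [PySem.Int.mod_eq_emod_of_pos hmpos, PySem.Int.mod_eq_emod_of_pos hmpos,
          show index - ((pvAllowed b).length : Int) - 1
              = (index - 1) - ((pvAllowed b).length : Int) from by ring,
          Int.sub_emod_right]

-- ===== VERDICT (by name: the statement is the Claim_ definition above) =====
theorem solution_spec : Claim_equal_solution := by
  intro s skip index _ hpre
  unfold Spec_solution solution solution_alt
  dsimp only
  rw [PySem.List.foldl_append_singleton_eq_map, List.nil_append]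
  refine congrArg String.mk (List.map_congr_left ?_)
  intro ch hch
  set b : List Int := skip.toList.map (fun c => (c.toNat : Int)) with hb
  set t : Int := ((ch.toNat : Nat) : Int) with htdef
  have hpred : (fun c : Int => !((PySem.Set.ofList b).contains c)) = (fun c : Int => !(b.contains c)) := by
    funext c
    simp [PySem.Set.mem_ofList]
  by_cases hi : 0 < index
  · have hp : pvAllowed b ≠ [] ∨ index ≤ ((pvNB b t).length : Int) := by
      rcases hpre with h0 | hA | hall
      · omega
      · exact Or.inl hA
      · exact Or.inr (hall ch hch)
    rw [pvChar b index t (by positivity) hi hp]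
    rw [if_pos hi]
    simp only [pvNB, pvAllowed, hpred]
  · rw [pvLoopR_bridge b index _ t 0, show index - 0 = index from by ring,
        pvLoopR_done b _ t index (by omega), if_neg hi]
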